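-- pv_equiv track=rewrite | github.com/s5unnyjjj/Algorithm | 02_Programmers/026_Lv2_숫자카드나누기.py | solution
-- ===== SOURCE A (Python) =====
-- def gcd(a, b):
--     if a % b == 0:
--         return b
--     return gcd(b, a % b)
--
-- def solution(arrayA, arrayB):
--     answer = 0
--
--     if len(arrayA) >= 2:
--         gcdA = gcd(arrayA[0], arrayA[1])
--         for valueA in arrayA[2:]:
--             gcdA = gcd(gcdA, valueA)
--     else:
--         gcdA = arrayA[0]
--
--     if len(arrayB) >= 2:
--         gcdB = gcd(arrayB[0], arrayB[1])
--         for valueB in arrayB[2:]: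
--             gcdB = gcd(gcdB, valueB)
--     else:
--         gcdB = arrayB[0]
--
--     for valueA in arrayA:
--         if valueA % gcdB == 0:
--             break
--     else:
--         answer = max(answer, gcdB)
--
--     for valueB in arrayB:
--         if valueB % gcdA == 0:
--             break
--     else:
--         answer = max(answer, gcdA)
--
--     return answer
-- ===== SOURCE B (Python) =====
-- def solution(arrayA, arrayB):
--     def igcd(a, b):
--         # iterative Euclid; b == 0 raises ZeroDivisionError like the original
--         r = a % b
--         while r != 0:
--             a, b = b, r
--             r = a % b
--         return b
--
--     def array_gcd(arr):
--         g = arr[0]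
--         for v in arr[1:]:
--             g = igcd(g, v)
--         return g
--
--     gcdA = array_gcd(arrayA)
--     gcdB = array_gcd(arrayB)
--
--     cands = [0]
--     if all(v % gcdB != 0 for v in arrayA):
--         cands.append(gcdB)
--     if all(v % gcdA != 0 for v in arrayB):
--         cands.append(gcdA)
--     return max(cands)
-- ===== Notes on version B (the rewrite author's own statement) =====
-- stated objective: idiomatic
-- what changed: Replaces the recursive gcd helper with an iterative Euclidean while-loop, folds each array's gcd with one uniform accumulation helper (no len>=2 branching), and replaces the two for/else scans with all() checks feeding a single max over a candidate list.
import Mathlib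
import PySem

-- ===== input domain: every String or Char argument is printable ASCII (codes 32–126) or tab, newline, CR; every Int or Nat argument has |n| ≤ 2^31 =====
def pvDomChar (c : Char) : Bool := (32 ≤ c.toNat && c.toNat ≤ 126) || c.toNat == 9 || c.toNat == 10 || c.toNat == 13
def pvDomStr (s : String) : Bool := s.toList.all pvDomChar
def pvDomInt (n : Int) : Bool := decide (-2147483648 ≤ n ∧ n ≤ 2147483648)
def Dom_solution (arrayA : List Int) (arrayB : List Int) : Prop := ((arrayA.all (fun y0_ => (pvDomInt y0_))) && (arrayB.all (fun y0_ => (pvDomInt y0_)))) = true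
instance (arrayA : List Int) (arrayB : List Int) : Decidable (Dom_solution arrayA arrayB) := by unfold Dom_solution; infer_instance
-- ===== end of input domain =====

-- B replaces the recursive gcd helper by an iterative Euclidean loop, folds each
-- array's gcd with one uniform helper, and replaces the for/else scans by all()
-- plus a single max over candidates (objective: idiomatic; same cost).

-- termination helper for both ports: Python's % strictly shrinks in magnitude
theorem pvModAbsLt (a b : Int) (hb : b ≠ 0) : (PySem.Int.mod a b).natAbs < b.natAbs := by
  rcases lt_or_gt_of_ne hb with h | h
  · have := PySem.Int.mod_neg_bounds a h
    omega
  · have h1 := PySem.Int.mod_nonneg a h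
    have h2 := PySem.Int.mod_lt a h
    omega

-- ===== PORT A =====
-- gcd(a, b): recursive; Python raises ZeroDivisionError when b == 0 (guarded here, excluded by Pre_)
def pyGcd (a b : Int) : Int :=
  if hb : b = 0 then 0
  else if PySem.Int.mod a b = 0 then b
  else pyGcd b (PySem.Int.mod a b)
termination_by b.natAbs
decreasing_by exact pvModAbsLt a b hb

-- the for/else divisibility scan: break at the first divisible element, else max the gcd in
def pvCheckLoop (xs : List Int) (g answer : Int) : Int :=
  match xs with
  | [] => max answer g
  | v :: rest => if PySem.Int.mod v g = 0 then answer else pvCheckLoop rest g answer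

def solution (arrayA : List Int) (arrayB : List Int) : Int :=
  let answer : Int := 0
  let gcdA :=
    if 2 ≤ arrayA.length then
      (PySem.List.slice arrayA (some 2) none).foldl pyGcd
        (pyGcd ((PySem.List.pyGet? arrayA 0).getD 0) ((PySem.List.pyGet? arrayA 1).getD 0))
    else (PySem.List.pyGet? arrayA 0).getD 0
  let gcdB :=
    if 2 ≤ arrayB.length then
      (PySem.List.slice arrayB (some 2) none).foldl pyGcd
        (pyGcd ((PySem.List.pyGet? arrayB 0).getD 0) ((PySem.List.pyGet? arrayB 1).getD 0))
    else (PySem.List.pyGet? arrayB 0).getD 0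
  let answer := pvCheckLoop arrayA gcdB answer
  let answer := pvCheckLoop arrayB gcdA answer
  answer

-- ===== PORT B =====
-- iterative Euclid: r = a % b; while r != 0: a, b = b, r; r = a % b; return b
def pvIgcdLoop (a b r : Int) : Int :=
  if hr : r = 0 then b
  else pvIgcdLoop b r (PySem.Int.mod b r)
termination_by r.natAbs
decreasing_by exact pvModAbsLt b r hr

def pvIgcd (a b : Int) : Int :=
  if _hb : b = 0 then 0   -- Python raises ZeroDivisionError here (excluded by Pre_)
  else pvIgcdLoop a b (PySem.Int.mod a b)

-- g = arr[0]; for v in arr[1:]: g = igcd(g, v)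
def pvArrayGcd (arr : List Int) : Int :=
  (PySem.List.slice arr (some 1) none).foldl pvIgcd ((PySem.List.pyGet? arr 0).getD 0)

def solution_alt (arrayA : List Int) (arrayB : List Int) : Int :=
  let gcdA := pvArrayGcd arrayA
  let gcdB := pvArrayGcd arrayB
  let cands : List Int := [0]
  let cands := if arrayA.all (fun v => !(PySem.Int.mod v gcdB == 0)) then cands ++ [gcdB] else cands
  let cands := if arrayB.all (fun v => !(PySem.Int.mod v gcdA == 0)) then cands ++ [gcdA] else cands
  (PySem.List.max? cands (fun x => x)).getD 0

-- ===== PRECONDITION & SPEC =====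
-- Pre_ excludes exactly the inputs on which A raises: an empty array (IndexError on
-- arr[0]) and any ZeroDivisionError (a zero past the first element feeds gcd's b,
-- and a one-element array [0] makes its gcd 0, dividing the final scan by zero).
def Pre_solution (arrayA : List Int) (arrayB : List Int) : Prop :=
  arrayA ≠ [] ∧ arrayB ≠ [] ∧ (∀ x ∈ arrayA.tail, x ≠ 0) ∧ (∀ x ∈ arrayB.tail, x ≠ 0) ∧
  arrayA ≠ [0] ∧ arrayB ≠ [0]
instance (arrayA : List Int) (arrayB : List Int) : Decidable (Pre_solution arrayA arrayB) := by
  unfold Pre_solution; infer_instance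

def pvWitness_solution : List Int × List Int := ([10, 17], [5, 20])

def Spec_solution (arrayA : List Int) (arrayB : List Int) (out : Int) : Prop := out = solution_alt arrayA arrayB
instance (arrayA : List Int) (arrayB : List Int) (out : Int) : Decidable (Spec_solution arrayA arrayB out) := by unfold Spec_solution; infer_instance

-- ===== CLAIM (what is proved, stated in full; the proofs are below) =====
def Claim_equal_solution : Prop := ∀ (arrayA : List Int) (arrayB : List Int), Dom_solution arrayA arrayB → Pre_solution arrayA arrayB → Spec_solution arrayA arrayB (solution arrayA arrayB)

-- ===== LEMMAS AND PROOFS =====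

theorem pvIgcdLoop_eq_pyGcd (n : Nat) : ∀ a b r : Int, r.natAbs ≤ n → r ≠ 0 →
    pvIgcdLoop a b r = pyGcd b r := by
  induction n with
  | zero => intro a b r hn hr; omega
  | succ n ih =>
    intro a b r hn hr
    rw [pvIgcdLoop, pyGcd]
    simp only [hr, dif_neg, not_false_iff]
    by_cases h0 : PySem.Int.mod b r = 0
    · rw [if_pos h0, h0, pvIgcdLoop]; simp
    · rw [if_neg h0]
      exact ih b r (PySem.Int.mod b r) (by have := pvModAbsLt b r hr; omega) h0

theorem pvIgcd_eq_pyGcd : pvIgcd = pyGcd := by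
  funext a b
  by_cases hb : b = 0
  · rw [pvIgcd, pyGcd]; simp [hb]
  · rw [pvIgcd, pyGcd]
    simp only [hb, dif_neg, not_false_iff]
    by_cases h0 : PySem.Int.mod a b = 0
    · rw [if_pos h0, h0, pvIgcdLoop]; simp
    · rw [if_neg h0]
      exact pvIgcdLoop_eq_pyGcd (PySem.Int.mod a b).natAbs a b _ le_rfl h0

-- B's array gcd equals A's gcd accumulation on any nonempty array
theorem pvArrayGcd_eq (arr : List Int) (h : arr ≠ []) :
    pvArrayGcd arr =
      (if 2 ≤ arr.length then
        (PySem.List.slice arr (some 2) none).foldl pyGcd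
          (pyGcd ((PySem.List.pyGet? arr 0).getD 0) ((PySem.List.pyGet? arr 1).getD 0))
      else (PySem.List.pyGet? arr 0).getD 0) := by
  match arr with
  | [a] =>
    simp [pvArrayGcd, PySem.List.slice_from_one]
  | a :: b :: rest =>
    have h2 : 2 ≤ (a :: b :: rest).length := by simp
    rw [if_pos h2, pvArrayGcd, pvIgcd_eq_pyGcd, PySem.List.slice_from_one]
    have hs : PySem.List.slice (a :: b :: rest) (some 2) none = rest := by
      rw [show (2 : Int) = ((2 : Nat) : Int) by norm_num, PySem.List.slice_from_natCast]
      rfl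
    rw [hs]
    simp [PySem.List.pyGet?, PySem.List.pyIdx?]

-- the for/else scan is all() followed by a conditional max
theorem pvCheckLoop_eq (xs : List Int) (g answer : Int) :
    pvCheckLoop xs g answer =
      if xs.all (fun v => !(PySem.Int.mod v g == 0)) then max answer g else answer := by
  induction xs with
  | nil => simp [pvCheckLoop]
  | cons v rest ih =>
    rw [pvCheckLoop]
    by_cases h : PySem.Int.mod v g = 0
    · simp [h]
    · simp [h, ih]

-- ===== VERDICT (by name: the statement is the Claim_ definition above) =====
theorem solution_spec : Claim_equal_solution := by
  intro arrayA arrayB _hdom hpre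
  obtain ⟨hA, hB, -, -, -, -⟩ := hpre
  show solution arrayA arrayB = solution_alt arrayA arrayB
  simp only [solution, solution_alt]
  rw [pvArrayGcd_eq arrayA hA, pvArrayGcd_eq arrayB hB, pvCheckLoop_eq, pvCheckLoop_eq]
  set gA := (if 2 ≤ arrayA.length then
        (PySem.List.slice arrayA (some 2) none).foldl pyGcd
          (pyGcd ((PySem.List.pyGet? arrayA 0).getD 0) ((PySem.List.pyGet? arrayA 1).getD 0))
      else (PySem.List.pyGet? arrayA 0).getD 0) with hgA
  set gB := (if 2 ≤ arrayB.length then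
        (PySem.List.slice arrayB (some 2) none).foldl pyGcd
          (pyGcd ((PySem.List.pyGet? arrayB 0).getD 0) ((PySem.List.pyGet? arrayB 1).getD 0))
      else (PySem.List.pyGet? arrayB 0).getD 0) with hgB
  by_cases ca : arrayA.all (fun v => !(PySem.Int.mod v gB == 0)) <;>
    by_cases cb : arrayB.all (fun v => !(PySem.Int.mod v gA == 0)) <;>
      simp [ca, cb, PySem.List.max?_id_cons]
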